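-- pv_equiv track=rewrite | github.com/pypi-data/pypi-mirror-376 | packages/git-sensei/git_sensei-0.1.0-py3-none-any.whl/git_sensei/safety.py | _generate_warning_message
-- ===== SOURCE A (Python) =====
-- from typing import List
--
-- def _generate_warning_message(patterns: List[str]) -> str:
--     """
--     Generate appropriate warning message for detected dangerous operations.
--
--     Args:
--         patterns: List of dangerous patterns found
--
--     Returns:
--         Human-readable warning message
--     """
--     if any("push" in pattern and "force" in pattern for pattern in patterns):
--         return (
--             "This command will force push changes, potentially overwriting "
--             "remote history and causing data loss for other developers."
--         )
--
--     if any("reset" in pattern and "hard" in pattern for pattern in patterns):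
--         return (
--             "This command will permanently discard uncommitted changes and "
--             "reset your working directory."
--         )
--
--     if any("filter-branch" in pattern for pattern in patterns):
--         return (
--             "This command will rewrite Git history, which can cause serious "
--             "issues for shared repositories."
--         )
--
--     if any("clean" in pattern and "f" in pattern for pattern in patterns):
--         return (
--             "This command will permanently delete untracked files and " "directories."
--         )
--
--     if any("reflog" in pattern and "expire" in pattern for pattern in patterns):
--         return (
--             "This command will remove reflog entries, making it harder to "
--             "recover lost commits."
--         )
--
--     if any("branch" in pattern and "D" in pattern for pattern in patterns):
--         return (
--             "This command will force delete branches, potentially losing unmerged work."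
--         )
--
--     # Generic warning for other dangerous operations
--     return (
--         "This command contains potentially dangerous operations that could "
--         "cause data loss or repository corruption."
--     )
-- ===== SOURCE B (Python) =====
-- from typing import List
--
-- # Single-pass rewrite: instead of A's six separate any(...)-scans of the list,
-- # B walks the patterns ONCE, accumulating a 6-tuple of category flags, and then
-- # selects the message of the first raised flag.
--
-- _MESSAGES = (
--     "This command will force push changes, potentially overwriting "
--     "remote history and causing data loss for other developers.",
--     "This command will permanently discard uncommitted changes and "
--     "reset your working directory.",
--     "This command will rewrite Git history, which can cause serious "
--     "issues for shared repositories.",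
--     "This command will permanently delete untracked files and directories.",
--     "This command will remove reflog entries, making it harder to "
--     "recover lost commits.",
--     "This command will force delete branches, potentially losing unmerged work.",
-- )
--
-- _GENERIC = (
--     "This command contains potentially dangerous operations that could "
--     "cause data loss or repository corruption."
-- )
--
-- def _matches(p: str):
--     return (
--         "push" in p and "force" in p,
--         "reset" in p and "hard" in p,
--         "filter-branch" in p,
--         "clean" in p and "f" in p,
--         "reflog" in p and "expire" in p,
--         "branch" in p and "D" in p,
--     )
--
-- def _generate_warning_message(patterns: List[str]) -> str:
--     flags = (False,) * 6
--     for p in patterns: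
--         flags = tuple(a or b for a, b in zip(flags, _matches(p)))
--     for flag, msg in zip(flags, _MESSAGES):
--         if flag:
--             return msg
--     return _GENERIC
-- ===== Notes on version B (the rewrite author's own statement) =====
-- stated objective: alternative
-- what changed: A makes up to six separate any(...)-scans of the pattern list, one per category; B traverses the list once, accumulating all six category flags in a tuple, and then picks the message of the first raised flag.
import Mathlib
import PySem

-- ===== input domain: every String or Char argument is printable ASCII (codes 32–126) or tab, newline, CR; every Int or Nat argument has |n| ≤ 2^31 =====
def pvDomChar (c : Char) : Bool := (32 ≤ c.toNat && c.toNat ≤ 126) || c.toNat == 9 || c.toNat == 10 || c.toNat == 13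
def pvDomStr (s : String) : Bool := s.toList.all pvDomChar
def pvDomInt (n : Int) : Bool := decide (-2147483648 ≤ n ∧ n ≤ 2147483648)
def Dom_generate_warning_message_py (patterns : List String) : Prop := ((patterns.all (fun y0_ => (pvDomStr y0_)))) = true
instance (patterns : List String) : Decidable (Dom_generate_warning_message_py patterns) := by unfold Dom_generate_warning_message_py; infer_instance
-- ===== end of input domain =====

-- B replaces A's six separate any(...)-scans by one pass over the patterns accumulating a 6-tuple of flags, then selects the first raised flag (objective: alternative).

-- ===== PORT A =====
def generate_warning_message_py (patterns : List String) : String :=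
  if patterns.any (fun p => PySem.Str.isIn "push" p && PySem.Str.isIn "force" p) then
    "This command will force push changes, potentially overwriting remote history and causing data loss for other developers."
  else if patterns.any (fun p => PySem.Str.isIn "reset" p && PySem.Str.isIn "hard" p) then
    "This command will permanently discard uncommitted changes and reset your working directory."
  else if patterns.any (fun p => PySem.Str.isIn "filter-branch" p) then
    "This command will rewrite Git history, which can cause serious issues for shared repositories."
  else if patterns.any (fun p => PySem.Str.isIn "clean" p && PySem.Str.isIn "f" p) then
    "This command will permanently delete untracked files and directories."
  else if patterns.any (fun p => PySem.Str.isIn "reflog" p && PySem.Str.isIn "expire" p) then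
    "This command will remove reflog entries, making it harder to recover lost commits."
  else if patterns.any (fun p => PySem.Str.isIn "branch" p && PySem.Str.isIn "D" p) then
    "This command will force delete branches, potentially losing unmerged work."
  else
    "This command contains potentially dangerous operations that could cause data loss or repository corruption."

-- ===== PORT B =====
abbrev GwFlags := Bool × Bool × Bool × Bool × Bool × Bool

def gwMessages : List String :=
  [ "This command will force push changes, potentially overwriting remote history and causing data loss for other developers.",
    "This command will permanently discard uncommitted changes and reset your working directory.",
    "This command will rewrite Git history, which can cause serious issues for shared repositories.",
    "This command will permanently delete untracked files and directories.",
    "This command will remove reflog entries, making it harder to recover lost commits.",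
    "This command will force delete branches, potentially losing unmerged work." ]

def gwGeneric : String :=
  "This command contains potentially dangerous operations that could cause data loss or repository corruption."

-- Source B's _matches: the six category tests on one pattern
def gwMatches (p : String) : GwFlags :=
  ( PySem.Str.isIn "push" p && PySem.Str.isIn "force" p,
    PySem.Str.isIn "reset" p && PySem.Str.isIn "hard" p,
    PySem.Str.isIn "filter-branch" p,
    PySem.Str.isIn "clean" p && PySem.Str.isIn "f" p,
    PySem.Str.isIn "reflog" p && PySem.Str.isIn "expire" p,
    PySem.Str.isIn "branch" p && PySem.Str.isIn "D" p )

-- the componentwise 'a or b' of Source B's tuple update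
def gwMerge (f g : GwFlags) : GwFlags :=
  ( f.1 || g.1, f.2.1 || g.2.1, f.2.2.1 || g.2.2.1,
    f.2.2.2.1 || g.2.2.2.1, f.2.2.2.2.1 || g.2.2.2.2.1, f.2.2.2.2.2 || g.2.2.2.2.2 )

def gwFlagList (f : GwFlags) : List Bool :=
  [f.1, f.2.1, f.2.2.1, f.2.2.2.1, f.2.2.2.2.1, f.2.2.2.2.2]

-- Source B's selection loop over zip(flags, _MESSAGES)
def gwSelect : List (Bool × String) → String
  | [] => gwGeneric
  | (flag, msg) :: rest => if flag then msg else gwSelect rest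

def generate_warning_message_py_alt (patterns : List String) : String :=
  let flags := patterns.foldl (fun f p => gwMerge f (gwMatches p)) (false, false, false, false, false, false)
  gwSelect ((gwFlagList flags).zip gwMessages)

-- ===== PRECONDITION & SPEC =====
def Spec_generate_warning_message_py (patterns : List String) (out : String) : Prop := out = generate_warning_message_py_alt patterns
instance (patterns : List String) (out : String) : Decidable (Spec_generate_warning_message_py patterns out) := by unfold Spec_generate_warning_message_py; infer_instance

-- ===== CLAIM (what is proved, stated in full; the proofs are below) =====
def Claim_equal_generate_warning_message_py : Prop := ∀ (patterns : List String), Dom_generate_warning_message_py patterns → Spec_generate_warning_message_py patterns (generate_warning_message_py patterns)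

-- ===== LEMMAS AND PROOFS =====

-- the fold's invariant: each accumulated flag is the initial flag or-ed with the any-scan of the list
theorem gwFold_eq (patterns : List String) : ∀ (f : GwFlags),
    patterns.foldl (fun f p => gwMerge f (gwMatches p)) f =
      gwMerge f
        ( patterns.any (fun p => PySem.Str.isIn "push" p && PySem.Str.isIn "force" p),
          patterns.any (fun p => PySem.Str.isIn "reset" p && PySem.Str.isIn "hard" p),
          patterns.any (fun p => PySem.Str.isIn "filter-branch" p),
          patterns.any (fun p => PySem.Str.isIn "clean" p && PySem.Str.isIn "f" p),
          patterns.any (fun p => PySem.Str.isIn "reflog" p && PySem.Str.isIn "expire" p),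
          patterns.any (fun p => PySem.Str.isIn "branch" p && PySem.Str.isIn "D" p) ) := by
  induction patterns with
  | nil => intro f; obtain ⟨a, b, c, d, e, g⟩ := f; simp [gwMerge]
  | cons p ps ih =>
      intro f
      simp only [List.foldl_cons, List.any_cons, ih]
      obtain ⟨a, b, c, d, e, g⟩ := f
      simp [gwMerge, gwMatches, Bool.or_assoc]

-- ===== VERDICT (by name: the statement is the Claim_ definition above) =====
theorem generate_warning_message_py_spec : Claim_equal_generate_warning_message_py := by
  intro patterns _
  unfold Spec_generate_warning_message_py generate_warning_message_py generate_warning_message_py_alt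
  simp only [gwFold_eq]
  simp only [gwMerge, gwFlagList, gwMessages, gwSelect, gwGeneric, List.zip, List.zipWith,
    Bool.false_or]
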